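-- pv_equiv track=rewrite | github.com/epibook/epibook.github.io | static/python/score_combination.py | num_combinations_for_final_score
-- ===== SOURCE A (Python) =====
-- def num_combinations_for_final_score(final_score, individual_play_scores):
--     # One way to reach 0.
--     num_combinations_for_score = [[1] + [0] * final_score
--                                   for _ in individual_play_scores]
--     for i in range(len(individual_play_scores)):
--         for j in range(1, final_score + 1):
--             without_this_play = (num_combinations_for_score[i - 1][j]
--                                  if i >= 1 else 0)
--             with_this_play = (
--                 num_combinations_for_score[i][j - individual_play_scores[i]]
--                 if j >= individual_play_scores[i] else 0)
--             num_combinations_for_score[i][j] = (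
--                 without_this_play + with_this_play)
--     return num_combinations_for_score[-1][-1]
-- ===== SOURCE B (Python) =====
-- def num_combinations_for_final_score(final_score, individual_play_scores):
--     # Generating-function product: the answer is the x^final_score coefficient
--     # of prod_s (1 + x^s + x^{2s} + ...).  Each truncated factor is applied in
--     # one pass of running prefix sums along every residue class modulo s,
--     # written into a fresh coefficient row.
--     poly = [1] + [0] * final_score
--     n = len(poly) - 1
--     for s in individual_play_scores:
--         if s > 0:
--             new = [0] * (n + 1)
--             for r in range(min(s, n + 1)):
--                 acc = 0
--                 for m in range(r, n + 1, s):
--                     acc += poly[m]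
--                     new[m] = acc
--             poly = new
--     return poly[-1]
-- ===== Notes on version B (the rewrite author's own statement) =====
-- stated objective: alternative
-- what changed: Replaces the 2D with/without DP recurrence by a truncated generating-function product: each play's factor (1 + x^s + x^2s + ...) is applied via running prefix sums along every residue class modulo s into a fresh coefficient row, instead of a dp table whose cells read earlier dp cells.
import Mathlib
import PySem

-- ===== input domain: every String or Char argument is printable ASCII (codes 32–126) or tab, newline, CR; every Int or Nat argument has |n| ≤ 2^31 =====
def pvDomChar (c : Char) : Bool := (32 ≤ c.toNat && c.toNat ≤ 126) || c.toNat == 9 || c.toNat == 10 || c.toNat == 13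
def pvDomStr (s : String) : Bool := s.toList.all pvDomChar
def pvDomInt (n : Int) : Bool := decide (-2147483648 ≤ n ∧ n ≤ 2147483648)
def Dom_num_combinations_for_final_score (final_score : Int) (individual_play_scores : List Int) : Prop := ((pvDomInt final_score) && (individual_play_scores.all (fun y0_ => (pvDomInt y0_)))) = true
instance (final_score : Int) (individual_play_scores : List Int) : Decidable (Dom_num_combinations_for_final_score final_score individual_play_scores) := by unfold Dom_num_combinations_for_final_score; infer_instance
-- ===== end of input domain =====

-- B replaces A's 2D with/without DP table by a truncated generating-function product:
-- each play's factor is applied by running prefix sums along every residue class modulo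
-- the play score, into a fresh coefficient row; same return values on Pre_.

-- ===== PORT A =====
-- Literal port of A's 2D dynamic-programming table.  Python's list-of-lists is stored as
-- one flat Array Int (row i at offsets [i*width, (i+1)*width), width = final_score+1 cells
-- per row) so that each read/write num[i][j] is one O(1) array access, exactly mirroring
-- Python's O(1) list indexing; getD/setIfInBounds are exact under Pre_, where every index
-- Python uses is in range (outside Pre_ Python raises IndexError and nothing is claimed).
def num_combinations_for_final_score (final_score : Int) (individual_play_scores : List Int) : Int :=
  let width := final_score.toNat + 1
  -- num_combinations_for_score = [[1] + [0] * final_score for _ in individual_play_scores]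
  let table0 : Array Int :=
    ((individual_play_scores.map (fun _ => 1 :: List.replicate final_score.toNat 0)).flatten).toArray
  -- for i in range(len(individual_play_scores)): for j in range(1, final_score + 1): ...
  let table :=
    (List.range individual_play_scores.length).foldl (fun tab i =>
      (PySem.List.pyRange 1 (final_score + 1) 1).foldl (fun tab j =>
        tab.setIfInBounds (i * width + j.toNat)
          ((if 1 ≤ i then tab.getD ((i - 1) * width + j.toNat) 0 else 0) +
           (if individual_play_scores.getD i 0 ≤ j then
              tab.getD (i * width + (j - individual_play_scores.getD i 0).toNat) 0
            else 0))) tab) table0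
  -- return num_combinations_for_score[-1][-1] = the last cell of the last row
  (PySem.List.pyGet? table.toList (-1)).getD 0

-- ===== PORT B =====
-- Literal port of B: poly = [1] + [0]*final_score; n = len(poly) - 1; for s in plays:
-- if s > 0: build new = [0]*(n+1) and for each residue r in range(min(s, n+1)) run a
-- prefix-sum accumulator acc over m in range(r, n+1, s): acc += poly[m]; new[m] = acc;
-- poly = new.  Return poly[-1].  All indices m lie in [0, n], so getD/set are exact here.
def num_combinations_for_final_score_alt (final_score : Int) (individual_play_scores : List Int) : Int :=
  let poly0 : List Int := 1 :: List.replicate final_score.toNat 0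
  let n : Nat := poly0.length - 1
  let poly := individual_play_scores.foldl (fun poly s =>
    if 0 < s then
      (PySem.List.pyRange 0 (min s ((n : Int) + 1)) 1).foldl (fun new r =>
        ((PySem.List.pyRange r ((n : Int) + 1) s).foldl
          (fun (st : List Int × Int) m =>
            let acc := st.2 + poly.getD m.toNat 0
            (st.1.set m.toNat acc, acc)) (new, 0)).1) (List.replicate (n + 1) 0)
    else poly) poly0
  (PySem.List.pyGet? poly (-1)).getD 0

-- ===== PRECONDITION & SPEC =====
-- Pre_ excludes exactly the inputs on which Python A raises IndexError: the empty play
-- list (num_combinations_for_score[-1] on []) and a negative play score together with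
-- final_score ≥ 1 (index j - s runs past the row end).  A returns on every other input.
def Pre_num_combinations_for_final_score (final_score : Int) (individual_play_scores : List Int) : Prop :=
  individual_play_scores ≠ [] ∧
    (final_score ≤ 0 ∨ ∀ s ∈ individual_play_scores, 0 ≤ s)
instance (final_score : Int) (individual_play_scores : List Int) : Decidable (Pre_num_combinations_for_final_score final_score individual_play_scores) := by unfold Pre_num_combinations_for_final_score; infer_instance

def pvWitness_num_combinations_for_final_score : Int × List Int := (10, [2, 3, 7])

def Spec_num_combinations_for_final_score (final_score : Int) (individual_play_scores : List Int) (out : Int) : Prop := out = num_combinations_for_final_score_alt final_score individual_play_scores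
instance (final_score : Int) (individual_play_scores : List Int) (out : Int) : Decidable (Spec_num_combinations_for_final_score final_score individual_play_scores out) := by unfold Spec_num_combinations_for_final_score; infer_instance

-- ===== CLAIM (what is proved, stated in full; the proofs are below) =====
def Claim_equal_num_combinations_for_final_score : Prop := ∀ (final_score : Int) (individual_play_scores : List Int), Dom_num_combinations_for_final_score final_score individual_play_scores → Pre_num_combinations_for_final_score final_score individual_play_scores → Spec_num_combinations_for_final_score final_score individual_play_scores (num_combinations_for_final_score final_score individual_play_scores)

-- ===== LEMMAS AND PROOFS =====

-- The shared initial row [1] + [0]*final_score.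
def pvInit (final : Int) : List Int := 1 :: List.replicate final.toNat 0

-- The rolling-update row step dp[j] += dp[j-s], used only as a PROOF-SIDE bridge between
-- A's 2D table and B's scatter step (neither port computes with it directly).
def pvStepB (final : Int) (dp : List Int) (s : Int) : List Int :=
  if 0 < s then
    (PySem.List.pyRange s (final + 1) 1).foldl
      (fun dp j => dp.set j.toNat (dp.getD j.toNat 0 + dp.getD (j - s).toNat 0)) dp
  else dp

-- B's residue-sweep step for one play score, exactly the body of B's outer loop
-- (n = final.toNat).
def pvStepC (final : Int) (poly : List Int) (s : Int) : List Int :=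
  if 0 < s then
    (PySem.List.pyRange 0 (min s ((final.toNat : Int) + 1)) 1).foldl (fun new r =>
      ((PySem.List.pyRange r ((final.toNat : Int) + 1) s).foldl
        (fun (st : List Int × Int) m =>
          let acc := st.2 + poly.getD m.toNat 0
          (st.1.set m.toNat acc, acc)) (new, 0)).1) (List.replicate (final.toNat + 1) 0)
  else poly

-- The common functional spec of one row update: g j = dp[j] + g (j-s) for 1 ≤ s ≤ j.
def pvG (dp : List Int) (s : Nat) : Nat → Int
  | j => if _h : 1 ≤ s ∧ s ≤ j then dp.getD j 0 + pvG dp s (j - s) else dp.getD j 0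
  termination_by j => j
  decreasing_by omega

-- Partial sums of poly over indices j < J congruent to k modulo s.
def pvPS (poly : List Int) (s : Int) (J k : Nat) : Int :=
  ((List.range J).map (fun j => if j ≤ k ∧ s ∣ ((k : Int) - (j : Int)) then poly.getD j 0 else 0)).sum

-- A's rows, expressed through the bridge step.
def pvRows (final : Int) (l : List Int) : Nat → List Int
  | 0 => pvStepB final (pvInit final) (l.getD 0 0)
  | k + 1 => pvStepB final (pvRows final l k) (l.getD (k + 1) 0)

lemma pvMapGetD (l : List Int) : (List.range l.length).map (fun j => l.getD j 0) = l := by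
  apply List.ext_getElem
  · simp
  · intro i h1 h2
    simp [List.getD_eq_getElem?_getD, List.getElem?_eq_getElem h2]

lemma pvStepB_loop (final : Int) (dp : List Int) (s : Int)
    (hlen : dp.length = final.toNat + 1) (hs : 0 < s) :
    ∀ m : Int, s ≤ m → m ≤ final + 1 →
    (PySem.List.pyRange s m 1).foldl
      (fun dp2 j => dp2.set j.toNat (dp2.getD j.toNat 0 + dp2.getD (j - s).toNat 0)) dp
    = (List.range (final.toNat + 1)).map
        (fun (k : Nat) => if (k : Int) < m then pvG dp s.toNat k else dp.getD k 0) := by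
  refine Int.le_induction ?_ ?_
  · intro _
    rw [PySem.List.pyRange_one_eq_nil (by omega)]
    simp only [List.foldl_nil]
    conv_lhs => rw [← pvMapGetD dp, hlen]
    apply List.map_congr_left
    intro k hk
    simp only [List.mem_range] at hk
    by_cases hks : (k : Int) < s
    · rw [if_pos hks, pvG, dif_neg (by omega)]
    · rw [if_neg hks]
  · intro m hm ih hle
    rw [PySem.List.pyRange_one_succ_right (by omega), List.foldl_append, ih (by omega)]
    simp only [List.foldl_cons, List.foldl_nil]
    have hmN : (m.toNat : Int) = m := Int.toNat_of_nonneg (by omega)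
    have hmsN : ((m - s).toNat : Int) = m - s := Int.toNat_of_nonneg (by omega)
    have hmlt : m.toNat < final.toNat + 1 := by omega
    have hmslt : (m - s).toNat < final.toNat + 1 := by omega
    have hget : ∀ (k : Nat), k < final.toNat + 1 →
        ((List.range (final.toNat + 1)).map
          (fun (k : Nat) => if (k : Int) < m then pvG dp s.toNat k else dp.getD k 0)).getD k 0
        = if (k : Int) < m then pvG dp s.toNat k else dp.getD k 0 := by
      intro k hk
      rw [List.getD_eq_getElem?_getD, List.getElem?_map, List.getElem?_range hk]
      rfl
    rw [hget _ hmlt, hget _ hmslt, if_neg (by omega), if_pos (by omega)]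
    have hpv : pvG dp s.toNat m.toNat = dp.getD m.toNat 0 + pvG dp s.toNat (m - s).toNat := by
      rw [pvG, dif_pos (by omega)]
      congr 2
      omega
    apply List.ext_getElem
    · simp
    · intro k hk1 hk2
      simp only [List.length_set, List.length_map, List.length_range] at hk1
      rw [List.getElem_set]
      by_cases hkm : m.toNat = k
      · subst hkm
        simp only [List.getElem_map, List.getElem_range]
        rw [if_pos (show ((m.toNat : Int) < m + 1) by omega)]
        simp [hpv]
      · rw [if_neg hkm]
        simp only [List.getElem_map, List.getElem_range]
        by_cases hlt : (k : Int) < m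
        · rw [if_pos hlt, if_pos (show ((k : Int) < m + 1) by omega)]
        · rw [if_neg hlt, if_neg (show ¬((k : Int) < m + 1) by omega)]

lemma pvStepB_spec (final : Int) (dp : List Int) (s : Int)
    (hlen : dp.length = final.toNat + 1) (hs : 0 ≤ s) :
    pvStepB final dp s = (List.range (final.toNat + 1)).map (pvG dp s.toNat) := by
  have hdp : (List.range (final.toNat + 1)).map (fun k => dp.getD k 0) = dp := by
    rw [← hlen]; exact pvMapGetD dp
  unfold pvStepB
  by_cases h : 0 < s
  · rw [if_pos h]
    by_cases h2 : s ≤ final + 1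
    · rw [pvStepB_loop final dp s hlen h (final + 1) h2 le_rfl]
      apply List.map_congr_left
      intro k hk
      simp only [List.mem_range] at hk
      rw [if_pos (by omega)]
    · rw [PySem.List.pyRange_one_eq_nil (by omega)]
      simp only [List.foldl_nil]
      conv_lhs => rw [← hdp]
      apply List.map_congr_left
      intro k hk
      simp only [List.mem_range] at hk
      rw [pvG, dif_neg (by omega)]
  · rw [if_neg h]
    conv_lhs => rw [← hdp]
    apply List.map_congr_left
    intro k hk
    rw [pvG, dif_neg (by omega)]

lemma pvInit_len (final : Int) : (pvInit final).length = final.toNat + 1 := by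
  simp [pvInit]

lemma pvInit_getD_pos (final : Int) (k : Nat) (hk : 1 ≤ k) :
    (pvInit final).getD k 0 = 0 := by
  unfold pvInit
  cases k with
  | zero => omega
  | succ k' =>
    rw [List.getD_eq_getElem?_getD]
    simp only [List.getElem?_cons_succ, List.getElem?_replicate]
    split <;> rfl

lemma pvRowA_loop (final : Int) (prev : List Int) (s : Int)
    (h0 : prev.getD 0 0 = 1) (hs : 0 ≤ s) :
    ∀ m : Int, 1 ≤ m → m ≤ final + 1 →
    (PySem.List.pyRange 1 m 1).foldl
      (fun cur j => cur.set j.toNat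
        (prev.getD j.toNat 0 + (if s ≤ j then cur.getD (j - s).toNat 0 else 0)))
      (pvInit final)
    = (List.range (final.toNat + 1)).map
        (fun (k : Nat) => if (k : Int) < m then pvG prev s.toNat k else (pvInit final).getD k 0) := by
  have hG0 : pvG prev s.toNat 0 = 1 := by rw [pvG, dif_neg (by omega)]; exact h0
  refine Int.le_induction ?_ ?_
  · intro _
    rw [PySem.List.pyRange_one_eq_nil (by omega)]
    simp only [List.foldl_nil]
    apply List.ext_getElem
    · simp [pvInit]
    · intro k hk1 hk2
      simp only [List.getElem_map, List.getElem_range]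
      rcases Nat.eq_zero_or_pos k with hk0 | hk0
      · subst hk0
        rw [if_pos (by omega), hG0]
        rfl
      · rw [if_neg (by omega), List.getD_eq_getElem?_getD, List.getElem?_eq_getElem hk1]
        rfl
  · intro m hm ih hle
    rw [PySem.List.pyRange_one_succ_right (by omega), List.foldl_append, ih (by omega)]
    simp only [List.foldl_cons, List.foldl_nil]
    have hmN : (m.toNat : Int) = m := Int.toNat_of_nonneg (by omega)
    have hmlt : m.toNat < final.toNat + 1 := by omega
    have hget : ∀ (k : Nat), k < final.toNat + 1 →
        ((List.range (final.toNat + 1)).map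
          (fun (k : Nat) => if (k : Int) < m then pvG prev s.toNat k else (pvInit final).getD k 0)).getD k 0
        = if (k : Int) < m then pvG prev s.toNat k else (pvInit final).getD k 0 := by
      intro k hk
      rw [List.getD_eq_getElem?_getD, List.getElem?_map, List.getElem?_range hk]
      rfl
    have hval : (prev.getD m.toNat 0 +
        (if s ≤ m then
          (((List.range (final.toNat + 1)).map
            (fun (k : Nat) => if (k : Int) < m then pvG prev s.toNat k else (pvInit final).getD k 0)).getD
            (m - s).toNat 0)
         else 0)) = pvG prev s.toNat m.toNat := by
      by_cases hsm : s ≤ m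
      · rw [if_pos hsm]
        have hmsN : ((m - s).toNat : Int) = m - s := Int.toNat_of_nonneg (by omega)
        rw [hget _ (by omega)]
        by_cases hs1 : 1 ≤ s
        · rw [if_pos (show (((m - s).toNat : Nat) : Int) < m by omega)]
          have hpv : pvG prev s.toNat m.toNat
              = prev.getD m.toNat 0 + pvG prev s.toNat ((m - s).toNat) := by
            conv_lhs => rw [pvG]
            rw [dif_pos (show 1 ≤ s.toNat ∧ s.toNat ≤ m.toNat by omega)]
            congr 2
            omega
          rw [hpv]
        · -- s = 0
          have hs0 : s = 0 := by omega
          subst hs0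
          simp only [Int.sub_zero]
          rw [if_neg (show ¬((((m).toNat : Nat) : Int) < m) by omega),
            pvInit_getD_pos final m.toNat (by omega)]
          rw [pvG, dif_neg (by omega)]
          simp
      · rw [if_neg hsm, pvG, dif_neg (by omega)]
        simp
    rw [hval]
    apply List.ext_getElem
    · simp
    · intro k hk1 hk2
      simp only [List.length_set, List.length_map, List.length_range] at hk1
      rw [List.getElem_set]
      by_cases hkm : m.toNat = k
      · subst hkm
        simp only [List.getElem_map, List.getElem_range, if_true]
        rw [if_pos (show ((m.toNat : Int) < m + 1) by omega)]
      · rw [if_neg hkm]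
        simp only [List.getElem_map, List.getElem_range]
        by_cases hlt : (k : Int) < m
        · rw [if_pos hlt, if_pos (show ((k : Int) < m + 1) by omega)]
        · rw [if_neg hlt, if_neg (show ¬((k : Int) < m + 1) by omega)]

lemma pvRowA_spec (final : Int) (prev : List Int) (s : Int)
    (hF : 1 ≤ final) (h0 : prev.getD 0 0 = 1) (hs : 0 ≤ s) :
    (PySem.List.pyRange 1 (final + 1) 1).foldl
      (fun cur j => cur.set j.toNat
        (prev.getD j.toNat 0 + (if s ≤ j then cur.getD (j - s).toNat 0 else 0)))
      (pvInit final)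
    = (List.range (final.toNat + 1)).map (pvG prev s.toNat) := by
  rw [pvRowA_loop final prev s h0 hs (final + 1) (by omega) le_rfl]
  apply List.map_congr_left
  intro k hk
  simp only [List.mem_range] at hk
  rw [if_pos (by omega)]

lemma pvSetGetD (l : List (List Int)) (k : Nat) (h : k < l.length) :
    l.set k (l.getD k []) = l := by
  rw [List.getD_eq_getElem?_getD, List.getElem?_eq_getElem h]
  simp

lemma pvGetDSetNe (l : List (List Int)) (k j : Nat) (h : k ≠ j) (v : List Int) :
    (l.set k v).getD j [] = l.getD j [] := by
  rw [List.getD_eq_getElem?_getD, List.getD_eq_getElem?_getD, List.getElem?_set_ne h]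

lemma pvGetDSetSelf (l : List (List Int)) (k : Nat) (h : k < l.length) (v : List Int) :
    (l.set k v).getD k [] = v := by
  rw [List.getD_eq_getElem?_getD, List.getElem?_set_self (by simpa using h)]
  rfl

lemma innerA_factor (l : List Int) (k : Nat) (prev : List Int) :
    ∀ (jl : List Int) (tab : List (List Int)), k < tab.length →
      (1 ≤ k → tab.getD (k - 1) [] = prev) →
    jl.foldl (fun tab j =>
        tab.set k ((tab.getD k []).set j.toNat
          ((if 1 ≤ k then (tab.getD (k - 1) []).getD j.toNat 0 else 0) +
           (if l.getD k 0 ≤ j then (tab.getD k []).getD (j - l.getD k 0).toNat 0 else 0)))) tab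
    = tab.set k (jl.foldl (fun cur j =>
        cur.set j.toNat
          ((if 1 ≤ k then prev.getD j.toNat 0 else 0) +
           (if l.getD k 0 ≤ j then cur.getD (j - l.getD k 0).toNat 0 else 0))) (tab.getD k [])) := by
  intro jl
  induction jl with
  | nil =>
    intro tab hk _
    simp only [List.foldl_nil]
    rw [pvSetGetD tab k hk]
  | cons j jl ih =>
    intro tab hk hprev
    simp only [List.foldl_cons]
    have hw : (if 1 ≤ k then (tab.getD (k - 1) []).getD j.toNat 0 else 0)
        = (if 1 ≤ k then prev.getD j.toNat 0 else 0) := by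
      by_cases h1 : 1 ≤ k
      · rw [if_pos h1, if_pos h1, hprev h1]
      · rw [if_neg h1, if_neg h1]
    rw [hw]
    set x := (tab.getD k []).set j.toNat
      ((if 1 ≤ k then prev.getD j.toNat 0 else 0) +
       (if l.getD k 0 ≤ j then (tab.getD k []).getD (j - l.getD k 0).toNat 0 else 0)) with hx
    rw [ih (tab.set k x) (by simpa using hk)
        (fun h1 => by rw [pvGetDSetNe tab k (k - 1) (by omega) x]; exact hprev h1)]
    rw [List.set_set, pvGetDSetSelf tab k hk x]

lemma pvGetD_nonneg (l : List Int) (hpos : ∀ x ∈ l, 0 ≤ x) (k : Nat) : 0 ≤ l.getD k 0 := by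
  rw [List.getD_eq_getElem?_getD]
  cases h : l[k]? with
  | none => exact le_refl 0
  | some x => exact hpos x (List.mem_of_getElem? h)

lemma pvStepB_len (final : Int) (dp : List Int) (s : Int)
    (hlen : dp.length = final.toNat + 1) (hs : 0 ≤ s) :
    (pvStepB final dp s).length = final.toNat + 1 := by
  rw [pvStepB_spec final dp s hlen hs]; simp

lemma pvStepB_head (final : Int) (dp : List Int) (s : Int)
    (hlen : dp.length = final.toNat + 1) (hs : 0 ≤ s) (h0 : dp.getD 0 0 = 1) :
    (pvStepB final dp s).getD 0 0 = 1 := by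
  rw [pvStepB_spec final dp s hlen hs, List.getD_eq_getElem?_getD, List.getElem?_map,
    List.getElem?_range (by omega : 0 < final.toNat + 1)]
  show pvG dp s.toNat 0 = 1
  rw [pvG, dif_neg (by omega)]
  exact h0

lemma pvRows_len (final : Int) (l : List Int) (hpos : ∀ x ∈ l, 0 ≤ x) :
    ∀ k, (pvRows final l k).length = final.toNat + 1 := by
  intro k
  induction k with
  | zero => exact pvStepB_len final _ _ (pvInit_len final) (pvGetD_nonneg l hpos 0)
  | succ k ih => exact pvStepB_len final _ _ ih (pvGetD_nonneg l hpos (k + 1))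

lemma pvRows_head (final : Int) (l : List Int) (hpos : ∀ x ∈ l, 0 ≤ x) :
    ∀ k, (pvRows final l k).getD 0 0 = 1 := by
  intro k
  induction k with
  | zero => exact pvStepB_head final _ _ (pvInit_len final) (pvGetD_nonneg l hpos 0) rfl
  | succ k ih =>
    exact pvStepB_head final _ _ (pvRows_len final l hpos k) (pvGetD_nonneg l hpos (k + 1)) ih

lemma pvFoldB_take (final : Int) (l : List Int) :
    ∀ k, k < l.length →
      (l.take (k + 1)).foldl (pvStepB final) (pvInit final) = pvRows final l k := by
  intro k
  induction k with
  | zero =>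
    intro hk
    cases l with
    | nil => simp at hk
    | cons x t =>
      show pvStepB final (pvInit final) x = pvRows final (x :: t) 0
      rfl
  | succ k ih =>
    intro hk
    rw [List.take_add_one, List.foldl_append, ih (by omega),
      List.getElem?_eq_getElem (by omega : k + 1 < l.length)]
    simp only [Option.toList_some, List.foldl_cons, List.foldl_nil]
    show pvStepB final (pvRows final l k) l[k + 1] = pvRows final l (k + 1)
    show pvStepB final (pvRows final l k) l[k + 1] = pvStepB final (pvRows final l k) (l.getD (k + 1) 0)
    congr 1
    rw [List.getD_eq_getElem?_getD, List.getElem?_eq_getElem (by omega : k + 1 < l.length)]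
    rfl

-- A's table as a named term (definitionally the fold in port A's body).
def pvTabA (final : Int) (l : List Int) (k : Nat) : List (List Int) :=
  (List.range k).foldl (fun tab i =>
    (PySem.List.pyRange 1 (final + 1) 1).foldl (fun tab j =>
      tab.set i ((tab.getD i []).set j.toNat
        ((if 1 ≤ i then (tab.getD (i - 1) []).getD j.toNat 0 else 0) +
         (if l.getD i 0 ≤ j then (tab.getD i []).getD (j - l.getD i 0).toNat 0 else 0)))) tab)
    (l.map (fun _ => 1 :: List.replicate final.toNat 0))

lemma pvTabA_succ (final : Int) (l : List Int) (k : Nat) :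
    pvTabA final l (k + 1)
    = (PySem.List.pyRange 1 (final + 1) 1).foldl (fun tab j =>
        tab.set k ((tab.getD k []).set j.toNat
          ((if 1 ≤ k then (tab.getD (k - 1) []).getD j.toNat 0 else 0) +
           (if l.getD k 0 ≤ j then (tab.getD k []).getD (j - l.getD k 0).toNat 0 else 0))))
        (pvTabA final l k) := by
  unfold pvTabA
  rw [List.range_succ, List.foldl_append]
  simp only [List.foldl_cons, List.foldl_nil]

lemma pvOuterA (final : Int) (l : List Int) (hF : 1 ≤ final) (hpos : ∀ x ∈ l, 0 ≤ x) :
    ∀ k, k ≤ l.length →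
    (pvTabA final l k).length = l.length ∧
    ∀ m, m < l.length →
      (k ≤ m → (pvTabA final l k).getD m [] = pvInit final) ∧
      (m < k → (pvTabA final l k).getD m [] = pvRows final l m) := by
  intro k
  induction k with
  | zero =>
    intro _
    unfold pvTabA
    simp only [List.range_zero, List.foldl_nil]
    constructor
    · simp
    · intro m hm
      refine ⟨fun _ => ?_, fun h => by omega⟩
      rw [List.getD_eq_getElem?_getD, List.getElem?_map, List.getElem?_eq_getElem hm]
      rfl
  | succ k ih =>
    intro hk1
    obtain ⟨hlen, hprops⟩ := ih (by omega)
    rw [pvTabA_succ]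
    have hklen : k < (pvTabA final l k).length := by omega
    have hs : 0 ≤ l.getD k 0 := pvGetD_nonneg l hpos k
    have hfac := innerA_factor l k
      (if k = 0 then pvInit final else pvRows final l (k - 1))
      (PySem.List.pyRange 1 (final + 1) 1) (pvTabA final l k) hklen
      (fun h1 => by
        rw [if_neg (by omega)]
        exact (hprops (k - 1) (by omega)).2 (by omega))
    rw [hfac]
    have hbase : (pvTabA final l k).getD k [] = pvInit final := (hprops k (by omega)).1 le_rfl
    rw [hbase]
    -- the factored row loop computes pvRows final l k
    have hrow : (PySem.List.pyRange 1 (final + 1) 1).foldl (fun cur j =>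
        cur.set j.toNat
          ((if 1 ≤ k then (if k = 0 then pvInit final else pvRows final l (k - 1)).getD j.toNat 0 else 0) +
           (if l.getD k 0 ≤ j then cur.getD (j - l.getD k 0).toNat 0 else 0))) (pvInit final)
        = pvRows final l k := by
      cases k with
      | zero =>
        rw [PySem.List.foldl_congr_mem (PySem.List.pyRange 1 (final + 1) 1) _
          (fun cur j =>
            cur.set j.toNat
              ((pvInit final).getD j.toNat 0 +
               (if l.getD 0 0 ≤ j then cur.getD (j - l.getD 0 0).toNat 0 else 0)))
          (pvInit final)
          (by
            intro acc x hx
            rw [PySem.List.mem_pyRange_one] at hx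
            beta_reduce
            rw [pvInit_getD_pos final x.toNat (by omega)]
            simp)]
        rw [pvRowA_spec final (pvInit final) (l.getD 0 0) hF rfl (pvGetD_nonneg l hpos 0),
          ← pvStepB_spec final (pvInit final) (l.getD 0 0) (pvInit_len final) (pvGetD_nonneg l hpos 0)]
        rfl
      | succ k' =>
        rw [PySem.List.foldl_congr_mem (PySem.List.pyRange 1 (final + 1) 1) _
          (fun cur j =>
            cur.set j.toNat
              ((pvRows final l k').getD j.toNat 0 +
               (if l.getD (k' + 1) 0 ≤ j then cur.getD (j - l.getD (k' + 1) 0).toNat 0 else 0)))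
          (pvInit final)
          (by
            intro acc x _
            beta_reduce
            simp)]
        rw [pvRowA_spec final (pvRows final l k') (l.getD (k' + 1) 0) hF
            (pvRows_head final l hpos k') (pvGetD_nonneg l hpos (k' + 1)),
          ← pvStepB_spec final (pvRows final l k') (l.getD (k' + 1) 0)
            (pvRows_len final l hpos k') (pvGetD_nonneg l hpos (k' + 1))]
        rfl
    rw [hrow]
    refine ⟨by simpa using hlen, fun m hm => ⟨fun hge => ?_, fun hlt => ?_⟩⟩
    · rw [pvGetDSetNe (pvTabA final l k) k m (by omega)]
      exact (hprops m hm).1 (by omega)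
    · by_cases hmk : m = k
      · subst hmk
        rw [pvGetDSetSelf (pvTabA final l m) m hklen]
      · rw [pvGetDSetNe (pvTabA final l k) k m (by omega)]
        exact (hprops m hm).2 (by omega)

-- A's flat table as a named term (definitionally the fold in port A's body).
def pvArrA (final : Int) (l : List Int) : Array Int :=
  (List.range l.length).foldl (fun tab i =>
    (PySem.List.pyRange 1 (final + 1) 1).foldl (fun tab j =>
      tab.setIfInBounds (i * (final.toNat + 1) + j.toNat)
        ((if 1 ≤ i then tab.getD ((i - 1) * (final.toNat + 1) + j.toNat) 0 else 0) +
         (if l.getD i 0 ≤ j then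
            tab.getD (i * (final.toNat + 1) + (j - l.getD i 0).toNat) 0
          else 0))) tab)
    ((l.map (fun _ => 1 :: List.replicate final.toNat 0)).flatten).toArray

-- The same flat table computed over List Int (mirror of pvArrA in the list world).
def pvFlatA (final : Int) (l : List Int) (k : Nat) : List Int :=
  (List.range k).foldl (fun tab i =>
    (PySem.List.pyRange 1 (final + 1) 1).foldl (fun tab j =>
      tab.set (i * (final.toNat + 1) + j.toNat)
        ((if 1 ≤ i then tab.getD ((i - 1) * (final.toNat + 1) + j.toNat) 0 else 0) +
         (if l.getD i 0 ≤ j then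
            tab.getD (i * (final.toNat + 1) + (j - l.getD i 0).toNat) 0
          else 0))) tab)
    ((l.map (fun _ => 1 :: List.replicate final.toNat 0)).flatten)

lemma pvAGetD (a : Array Int) (i : Nat) (d : Int) : a.getD i d = a.toList.getD i d := by
  rw [List.getD_eq_getElem?_getD, Array.getElem?_toList, Array.getD_eq_getD_getElem?]

lemma pvFoldToList {alpha : Type} (l : List alpha) (fA : Array Int → alpha → Array Int)
    (fL : List Int → alpha → List Int) (h : ∀ a x, (fA a x).toList = fL a.toList x) :
    ∀ a : Array Int, (l.foldl fA a).toList = l.foldl fL a.toList := by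
  induction l with
  | nil => intro a; rfl
  | cons x t ih => intro a; rw [List.foldl_cons, List.foldl_cons, ih, h]

lemma pvArrA_toList (final : Int) (l : List Int) :
    (pvArrA final l).toList = pvFlatA final l l.length := by
  unfold pvArrA pvFlatA
  refine (pvFoldToList (List.range l.length)
    (fun tab i =>
      (PySem.List.pyRange 1 (final + 1) 1).foldl (fun tab j =>
        tab.setIfInBounds (i * (final.toNat + 1) + j.toNat)
          ((if 1 ≤ i then tab.getD ((i - 1) * (final.toNat + 1) + j.toNat) 0 else 0) +
           (if l.getD i 0 ≤ j then
              tab.getD (i * (final.toNat + 1) + (j - l.getD i 0).toNat) 0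
            else 0))) tab)
    (fun tab i =>
      (PySem.List.pyRange 1 (final + 1) 1).foldl (fun tab j =>
        tab.set (i * (final.toNat + 1) + j.toNat)
          ((if 1 ≤ i then tab.getD ((i - 1) * (final.toNat + 1) + j.toNat) 0 else 0) +
           (if l.getD i 0 ≤ j then
              tab.getD (i * (final.toNat + 1) + (j - l.getD i 0).toNat) 0
            else 0))) tab)
    ?_ _).trans (by rw [List.toList_toArray])
  intro a i
  exact pvFoldToList _ _ _
    (fun a2 j => by rw [Array.toList_setIfInBounds, pvAGetD, pvAGetD]) a

lemma pvFlatA_succ (final : Int) (l : List Int) (k : Nat) :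
    pvFlatA final l (k + 1)
    = (PySem.List.pyRange 1 (final + 1) 1).foldl (fun tab j =>
        tab.set (k * (final.toNat + 1) + j.toNat)
          ((if 1 ≤ k then tab.getD ((k - 1) * (final.toNat + 1) + j.toNat) 0 else 0) +
           (if l.getD k 0 ≤ j then
              tab.getD (k * (final.toNat + 1) + (j - l.getD k 0).toNat) 0
            else 0)))
        (pvFlatA final l k) := by
  unfold pvFlatA
  rw [List.range_succ, List.foldl_append]
  simp only [List.foldl_cons, List.foldl_nil]

lemma pvGetDAppendRight (l l2 : List Int) (d : Int) (n : Nat) (h : l.length ≤ n) :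
    (l ++ l2).getD n d = l2.getD (n - l.length) d := by
  rw [List.getD_eq_getElem?_getD, List.getD_eq_getElem?_getD, List.getElem?_append_right h]

lemma pvFlatGetD (w : Nat) :
    ∀ (L : List (List Int)) (k j : Nat), (∀ m, m < L.length → (L.getD m []).length = w) →
      k < L.length → j < w → L.flatten.getD (k * w + j) 0 = (L.getD k []).getD j 0 := by
  intro L
  induction L with
  | nil => intro k j _ hk; simp at hk
  | cons r t ih =>
    intro k j hrows hk hj
    have hr : r.length = w := hrows 0 (by simp)
    cases k with
    | zero =>
      rw [List.flatten_cons, Nat.zero_mul, Nat.zero_add,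
        List.getD_append _ _ _ j (by omega)]
      rfl
    | succ k =>
      rw [List.flatten_cons, Nat.succ_mul]
      rw [show k * w + w + j = r.length + (k * w + j) by omega]
      rw [pvGetDAppendRight _ _ _ _ (by omega), Nat.add_sub_cancel_left]
      rw [List.getD_cons_succ]
      exact ih k j (fun m hm => hrows (m + 1) (by simpa using hm)) (by simpa using hk) hj

lemma pvFlatSet (w : Nat) :
    ∀ (L : List (List Int)) (k j : Nat) (v : Int),
      (∀ m, m < L.length → (L.getD m []).length = w) → k < L.length → j < w →
      L.flatten.set (k * w + j) v = (L.set k ((L.getD k []).set j v)).flatten := by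
  intro L
  induction L with
  | nil => intro k j v _ hk; simp at hk
  | cons r t ih =>
    intro k j v hrows hk hj
    have hr : r.length = w := hrows 0 (by simp)
    cases k with
    | zero =>
      rw [List.flatten_cons, Nat.zero_mul, Nat.zero_add,
        List.set_append_left _ _ (by omega)]
      rfl
    | succ k =>
      rw [List.flatten_cons, Nat.succ_mul]
      rw [show k * w + w + j = r.length + (k * w + j) by omega]
      rw [List.set_append_right _ _ (by omega), Nat.add_sub_cancel_left]
      rw [List.set_cons_succ, List.flatten_cons, List.getD_cons_succ]
      rw [ih k j v (fun m hm => hrows (m + 1) (by simpa using hm)) (by simpa using hk) hj]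

-- the inner flat loop mirrors the inner 2D loop on a well-shaped table
lemma pvInnerFlat (final : Int) (l : List Int) (k : Nat) (hF : 1 ≤ final)
    (hs : 0 ≤ l.getD k 0) :
    ∀ (jl : List Int), (∀ j, j ∈ jl → 1 ≤ j ∧ j < final + 1) →
    ∀ (T : List (List Int)),
      (∀ m, m < T.length → (T.getD m []).length = final.toNat + 1) → k < T.length →
    jl.foldl (fun tab j =>
        tab.set (k * (final.toNat + 1) + j.toNat)
          ((if 1 ≤ k then tab.getD ((k - 1) * (final.toNat + 1) + j.toNat) 0 else 0) +
           (if l.getD k 0 ≤ j then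
              tab.getD (k * (final.toNat + 1) + (j - l.getD k 0).toNat) 0
            else 0))) T.flatten
    = (jl.foldl (fun tab j =>
        tab.set k ((tab.getD k []).set j.toNat
          ((if 1 ≤ k then (tab.getD (k - 1) []).getD j.toNat 0 else 0) +
           (if l.getD k 0 ≤ j then (tab.getD k []).getD (j - l.getD k 0).toNat 0 else 0)))) T).flatten := by
  intro jl
  induction jl with
  | nil => intro _ T _ _; rfl
  | cons j jl ih =>
    intro hjl T hrows hk
    have hj := hjl j (by simp)
    have hjN : j.toNat < final.toNat + 1 := by omega
    simp only [List.foldl_cons]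
    have hw : (if 1 ≤ k then T.flatten.getD ((k - 1) * (final.toNat + 1) + j.toNat) 0 else 0)
        = (if 1 ≤ k then (T.getD (k - 1) []).getD j.toNat 0 else 0) := by
      by_cases h1 : 1 ≤ k
      · rw [if_pos h1, if_pos h1, pvFlatGetD _ _ _ _ hrows (by omega) hjN]
      · rw [if_neg h1, if_neg h1]
    have hwi : (if l.getD k 0 ≤ j then
          T.flatten.getD (k * (final.toNat + 1) + (j - l.getD k 0).toNat) 0 else 0)
        = (if l.getD k 0 ≤ j then (T.getD k []).getD (j - l.getD k 0).toNat 0 else 0) := by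
      by_cases h2 : l.getD k 0 ≤ j
      · rw [if_pos h2, if_pos h2, pvFlatGetD _ _ _ _ hrows hk (by omega)]
      · rw [if_neg h2, if_neg h2]
    rw [hw, hwi, pvFlatSet _ _ _ _ _ hrows hk hjN]
    refine ih (fun j2 hj2 => hjl j2 (List.mem_cons_of_mem _ hj2)) _ ?_ (by simpa using hk)
    intro m hm
    rw [List.length_set] at hm
    by_cases hmk : m = k
    · subst hmk
      rw [pvGetDSetSelf _ _ (by omega), List.length_set]
      exact hrows m hm
    · rw [pvGetDSetNe _ _ _ (by omega)]
      exact hrows m hm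

lemma pvFlatA_eq (final : Int) (l : List Int) (hF : 1 ≤ final) (hpos : ∀ x ∈ l, 0 ≤ x) :
    ∀ k, k ≤ l.length → pvFlatA final l k = (pvTabA final l k).flatten := by
  intro k
  induction k with
  | zero => intro _; rfl
  | succ k ih =>
    intro hk1
    obtain ⟨hlen, hprops⟩ := pvOuterA final l hF hpos k (by omega)
    have hrows : ∀ m, m < (pvTabA final l k).length →
        ((pvTabA final l k).getD m []).length = final.toNat + 1 := by
      intro m hm
      rw [hlen] at hm
      by_cases hmk : k ≤ m
      · rw [(hprops m hm).1 hmk]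
        exact pvInit_len final
      · rw [(hprops m hm).2 (by omega)]
        exact pvRows_len final l hpos m
    rw [pvFlatA_succ, pvTabA_succ, ih (by omega)]
    exact pvInnerFlat final l k hF (pvGetD_nonneg l hpos k) _
      (fun j hj => by rw [PySem.List.mem_pyRange_one] at hj; exact hj) _ hrows (by omega)

lemma pvFlatOnes (l : List Int) :
    ((l.map (fun _ => ([1] : List Int))).flatten) = List.replicate l.length 1 := by
  induction l with
  | nil => rfl
  | cons x t ih => simp only [List.map_cons, List.flatten_cons, List.length_cons,
      List.replicate_succ, ih]; rfl

-- ========== new B-side lemmas: the residue sweep computes pvG ==========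

lemma pvPS_succ (poly : List Int) (s : Int) (J k : Nat) :
    pvPS poly s (J + 1) k
    = pvPS poly s J k + (if J ≤ k ∧ s ∣ ((k : Int) - (J : Int)) then poly.getD J 0 else 0) := by
  unfold pvPS
  rw [List.range_succ, List.map_append, List.sum_append]
  simp

-- drop trailing terms whose condition is false
lemma pvPS_drop (poly : List Int) (s : Int) (J' k : Nat) :
    ∀ d, (∀ j, J' ≤ j → j < J' + d → ¬(j ≤ k ∧ s ∣ ((k : Int) - (j : Int)))) →
      pvPS poly s (J' + d) k = pvPS poly s J' k := by
  intro d
  induction d with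
  | zero => intro _; rfl
  | succ d ih =>
    intro h
    rw [show J' + (d + 1) = (J' + d) + 1 by omega, pvPS_succ,
      if_neg (h (J' + d) (by omega) (by omega)), add_zero]
    exact ih (fun j h1 h2 => h j h1 (by omega))

lemma pvNotDvd (s d : Int) (h1 : 0 < d) (h2 : d < s) : ¬ s ∣ d := by
  intro hdvd
  have := Int.le_of_dvd h1 hdvd
  omega

-- terms with index above k contribute nothing
lemma pvPS_top (poly : List Int) (s : Int) (n k : Nat) (hk : k ≤ n) :
    pvPS poly s (n + 1) k = pvPS poly s (k + 1) k := by
  rw [show n + 1 = (k + 1) + (n - k) by omega]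
  exact pvPS_drop poly s (k + 1) k (n - k) (fun j hj1 _ => by
    rintro ⟨hle, _⟩; omega)

-- below the first multiple of s in k's class the sum is empty
lemma pvPS_small (poly : List Int) (s : Int) (k : Nat) (hk : k < s.toNat) :
    pvPS poly s k k = 0 := by
  have := pvPS_drop poly s 0 k k (fun j hj1 hj2 => by
    rintro ⟨hle, hdvd⟩
    exact pvNotDvd s ((k : Int) - j) (by omega) (by omega) hdvd)
  rw [Nat.zero_add] at this
  rw [this]
  rfl

-- step one multiple of s down the residue class
lemma pvPS_down (poly : List Int) (s : Int) (hs : 0 < s) (k : Nat) (hsk : s.toNat ≤ k) :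
    pvPS poly s k k = pvPS poly s (k - s.toNat + 1) (k - s.toNat) := by
  have hs1 : 1 ≤ s.toNat := by omega
  have hsI : ((s.toNat : Int)) = s := Int.toNat_of_nonneg (by omega)
  have h2 : pvPS poly s k k = pvPS poly s (k - s.toNat + 1) k := by
    have hd := pvPS_drop poly s (k - s.toNat + 1) k (s.toNat - 1) (fun j hj1 hj2 => by
      rintro ⟨hle, hdvd⟩
      exact pvNotDvd s ((k : Int) - j) (by omega) (by omega) hdvd)
    rw [show (k - s.toNat + 1) + (s.toNat - 1) = k by omega] at hd
    exact hd
  have h3 : pvPS poly s (k - s.toNat + 1) k = pvPS poly s (k - s.toNat + 1) (k - s.toNat) := by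
    unfold pvPS
    congr 1
    apply List.map_congr_left
    intro j hj
    simp only [List.mem_range] at hj
    have hcast : ((k - s.toNat : Nat) : Int) = (k : Int) - s := by omega
    have hsplit : (k : Int) - j = s + (((k - s.toNat : Nat) : Int) - (j : Int)) := by
      rw [hcast]; ring
    have hiff : (s ∣ ((k : Int) - (j : Int)))
        ↔ (s ∣ (((k - s.toNat : Nat) : Int) - (j : Int))) := by
      rw [hsplit]
      exact dvd_add_right (dvd_refl s)
    by_cases hdvd : s ∣ ((k : Int) - (j : Int))
    · rw [if_pos ⟨by omega, hdvd⟩, if_pos ⟨by omega, hiff.mp hdvd⟩]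
    · rw [if_neg (by rintro ⟨_, h⟩; exact hdvd h),
        if_neg (by rintro ⟨_, h⟩; exact hdvd (hiff.mpr h))]
  rw [h2, h3]

lemma pvPS_eq_pvG (poly : List Int) (s : Int) (hs : 0 < s) (n : Nat) :
    ∀ k, k ≤ n → pvPS poly s (n + 1) k = pvG poly s.toNat k := by
  intro k
  induction k using Nat.strong_induction_on with
  | _ k ih =>
    intro hk
    have hs1 : 1 ≤ s.toNat := by omega
    rw [pvPS_top poly s n k hk, pvPS_succ, if_pos ⟨le_rfl, by simp⟩]
    by_cases hsk : s.toNat ≤ k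
    · rw [pvPS_down poly s hs k hsk, ← pvPS_top poly s n (k - s.toNat) (by omega),
        ih (k - s.toNat) (by omega) (by omega)]
      conv_rhs => rw [pvG]
      rw [dif_pos ⟨hs1, hsk⟩]
      ring
    · rw [pvPS_small poly s k (by omega), pvG, dif_neg (by omega)]
      ring

-- membership in the residue class r modulo s, as a closed condition
lemma pvResidue (s R : Int) (hR0 : 0 ≤ R) (hRs : R < s) (k : Nat) :
    (R ≤ (k : Int) ∧ s ∣ ((k : Int) - R)) ↔ (k : Int) % s = R := by
  constructor
  · rintro ⟨h1, q, hq⟩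
    have hk : (k : Int) = R + s * q := by omega
    rw [hk, Int.add_mul_emod_self_left, Int.emod_eq_of_lt hR0 hRs]
  · intro h
    refine ⟨?_, ?_⟩
    · by_cases hks : (k : Int) < s
      · rw [Int.emod_eq_of_lt (by positivity) hks] at h
        omega
      · omega
    · have h0 : ((k : Int) - R) % s = 0 := by
        rw [Int.sub_emod, h, Int.emod_eq_of_lt hR0 hRs]
        simp
      exact Int.dvd_of_emod_eq_zero h0

-- one residue-class sweep: the accumulator is the class prefix sum, each visited
-- cell receives its own prefix sum, other cells are untouched
lemma pvSweep (poly : List Int) (s : Int) (hs : 0 < s) (r : Int) (hr0 : 0 ≤ r)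
    (hrs : r < s) :
    ∀ (N : Nat) (x : List Int),
    ((((List.range N).map (fun t : Nat => r + s * t)).foldl
        (fun (st : List Int × Int) m =>
          let acc := st.2 + poly.getD m.toNat 0
          (st.1.set m.toNat acc, acc)) (x, 0)).1.length = x.length) ∧
    ((((List.range N).map (fun t : Nat => r + s * t)).foldl
        (fun (st : List Int × Int) m =>
          let acc := st.2 + poly.getD m.toNat 0
          (st.1.set m.toNat acc, acc)) (x, 0)).2
      = pvPS poly s (r + s * N).toNat (r + s * N).toNat) ∧
    ∀ k : Nat, k < x.length →
      (((List.range N).map (fun t : Nat => r + s * t)).foldl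
        (fun (st : List Int × Int) m =>
          let acc := st.2 + poly.getD m.toNat 0
          (st.1.set m.toNat acc, acc)) (x, 0)).1.getD k 0
      = if r ≤ (k : Int) ∧ (k : Int) < r + s * N ∧ s ∣ ((k : Int) - r) then
          pvPS poly s (k + 1) k
        else x.getD k 0 := by
  intro N
  induction N with
  | zero =>
    intro x
    refine ⟨rfl, ?_, fun k _ => ?_⟩
    · simp only [List.range_zero, List.map_nil, List.foldl_nil, Nat.cast_zero, mul_zero,
        add_zero]
      rw [pvPS_small poly s r.toNat (by omega)]
    · simp only [List.range_zero, List.map_nil, List.foldl_nil, Nat.cast_zero, mul_zero,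
        add_zero]
      rw [if_neg (by rintro ⟨h1, h2, -⟩; omega)]
  | succ N ih =>
    intro x
    obtain ⟨ihlen, ihacc, ihget⟩ := ih x
    rw [List.range_succ, List.map_append, List.foldl_append]
    simp only [List.map_cons, List.map_nil, List.foldl_cons, List.foldl_nil]
    set F := (((List.range N).map (fun t : Nat => r + s * t)).foldl
        (fun (st : List Int × Int) m =>
          let acc := st.2 + poly.getD m.toNat 0
          (st.1.set m.toNat acc, acc)) (x, 0)) with hF
    have hsn : 0 ≤ s * (N : Int) := mul_nonneg (le_of_lt hs) (by positivity)
    have hmul : s * ((N : Int) + 1) = s * (N : Int) + s := by ring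
    have hidx : (((r + s * N).toNat : Int)) = r + s * N := Int.toNat_of_nonneg (by omega)
    have hacc2 : F.2 + poly.getD (r + s * N).toNat 0
        = pvPS poly s ((r + s * N).toNat + 1) ((r + s * N).toNat) := by
      rw [ihacc, pvPS_succ, if_pos ⟨le_rfl, by simp⟩]
    have haccN : F.2 + poly.getD (r + s * N).toNat 0
        = pvPS poly s (r + s * ((N : Nat) + 1)).toNat (r + s * ((N : Nat) + 1)).toNat := by
      rw [hacc2]
      have hk' : (r + s * ((N : Nat) + 1)).toNat = (r + s * N).toNat + s.toNat := by
        omega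
      rw [hk', pvPS_down poly s hs ((r + s * N).toNat + s.toNat) (by omega)]
      congr 1 <;> omega
    refine ⟨?_, ?_, ?_⟩
    · show (F.1.set (r + s * (N : Int)).toNat (F.2 + poly.getD (r + s * (N : Int)).toNat 0)).length
        = x.length
      rw [List.length_set]
      exact ihlen
    · show F.2 + poly.getD (r + s * (N : Int)).toNat 0 = _
      exact haccN
    intro k hk
    show (F.1.set (r + s * (N : Int)).toNat (F.2 + poly.getD (r + s * (N : Int)).toNat 0)).getD k 0
      = _
    by_cases hkm : k = (r + s * N).toNat
    · -- the newly written cell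
      have hkI : (k : Int) = r + s * N := by rw [hkm]; exact hidx
      rw [List.getD_eq_getElem?_getD, ← hkm, List.getElem?_set_self (by rw [ihlen]; omega)]
      simp only [Option.getD_some]
      rw [hkm, hacc2, ← hkm]
      rw [if_pos ⟨by omega, by push_cast; omega, by rw [hkI]; exact ⟨(N : Int), by ring⟩⟩]
    · -- untouched cell
      rw [List.getD_eq_getElem?_getD, List.getElem?_set_ne (by omega),
        ← List.getD_eq_getElem?_getD, ihget k hk]
      by_cases hc : r ≤ (k : Int) ∧ (k : Int) < r + s * N ∧ s ∣ ((k : Int) - r)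
      · rw [if_pos hc, if_pos ⟨hc.1, by push_cast; omega, hc.2.2⟩]
      · rw [if_neg hc, if_neg ?_]
        rintro ⟨h1, h2, h3⟩
        apply hc
        refine ⟨h1, ?_, h3⟩
        obtain ⟨q, hq⟩ := h3
        have hq0 : 0 ≤ q := by nlinarith
        have hqN : q < (N : Int) + 1 := by
          by_contra hcon
          push_cast at h2
          nlinarith
        have hkne : (k : Int) ≠ r + s * N := by
          intro he
          apply hkm
          omega
        have : q ≠ (N : Int) := by
          intro he
          apply hkne
          rw [he] at hq
          omega
        have hqN' : q < (N : Int) := by omega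
        nlinarith

-- the sweep over pyRange r (n+1) s covers the whole class below n+1
lemma pvSweepFull (poly : List Int) (s : Int) (hs : 0 < s) (r : Int) (hr0 : 0 ≤ r)
    (hrs : r < s) (b : Int) (hab : r < b) (x : List Int) (hx : (x.length : Int) = b) :
    (((PySem.List.pyRange r b s).foldl
        (fun (st : List Int × Int) m =>
          let acc := st.2 + poly.getD m.toNat 0
          (st.1.set m.toNat acc, acc)) (x, 0)).1.length = x.length) ∧
    ∀ k : Nat, k < x.length →
      ((PySem.List.pyRange r b s).foldl
        (fun (st : List Int × Int) m =>
          let acc := st.2 + poly.getD m.toNat 0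
          (st.1.set m.toNat acc, acc)) (x, 0)).1.getD k 0
      = if r ≤ (k : Int) ∧ s ∣ ((k : Int) - r) then pvPS poly s (k + 1) k
        else x.getD k 0 := by
  rw [PySem.List.pyRange_of_pos r b hs, if_pos hab]
  set N := ((b - r + s - 1) / s).toNat with hN
  obtain ⟨hlen, hacc, hget⟩ := pvSweep poly s hs r hr0 hrs N x
  refine ⟨hlen, fun k hk => ?_⟩
  rw [hget k hk]
  have hdm := Int.mul_ediv_add_emod (b - r + s - 1) s
  have hm1 : 0 ≤ (b - r + s - 1) % s := Int.emod_nonneg _ (by omega)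
  have hm2 : (b - r + s - 1) % s < s := Int.emod_lt_of_pos _ hs
  have hq0 : 0 ≤ (b - r + s - 1) / s := Int.ediv_nonneg (by omega) (by omega)
  have hNI : ((N : Int)) = (b - r + s - 1) / s := by rw [hN]; exact Int.toNat_of_nonneg hq0
  have hcov : b ≤ r + s * N := by
    rw [hNI]
    omega
  by_cases hc : r ≤ (k : Int) ∧ s ∣ ((k : Int) - r)
  · rw [if_pos ⟨hc.1, by omega, hc.2⟩, if_pos hc]
  · rw [if_neg ?_, if_neg hc]
    rintro ⟨h1, _, h3⟩
    exact hc ⟨h1, h3⟩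

-- the outer loop over residue classes fills every cell with its class prefix sum
lemma pvOuterC (final : Int) (poly : List Int) (s : Int) (hs : 0 < s) :
    ∀ R : Int, 0 ≤ R → R ≤ min s ((final.toNat : Int) + 1) →
    (((PySem.List.pyRange 0 R 1).foldl (fun new r =>
        ((PySem.List.pyRange r ((final.toNat : Int) + 1) s).foldl
          (fun (st : List Int × Int) m =>
            let acc := st.2 + poly.getD m.toNat 0
            (st.1.set m.toNat acc, acc)) (new, 0)).1)
        (List.replicate (final.toNat + 1) 0)).length = final.toNat + 1) ∧
    ∀ k, k < final.toNat + 1 →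
      ((PySem.List.pyRange 0 R 1).foldl (fun new r =>
        ((PySem.List.pyRange r ((final.toNat : Int) + 1) s).foldl
          (fun (st : List Int × Int) m =>
            let acc := st.2 + poly.getD m.toNat 0
            (st.1.set m.toNat acc, acc)) (new, 0)).1)
        (List.replicate (final.toNat + 1) 0)).getD k 0
      = if (k : Int) % s < R then pvPS poly s (final.toNat + 1) k else 0 := by
  intro R
  refine Int.le_induction ?_ ?_ R
  · intro _
    rw [PySem.List.pyRange_one_eq_nil le_rfl]
    simp only [List.foldl_nil]
    refine ⟨by simp, fun k hk => ?_⟩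
    rw [if_neg (by
      intro hcon
      have h0 : 0 ≤ (k : Int) % s := Int.emod_nonneg _ (by omega)
      omega)]
    rw [List.getD_eq_getElem?_getD, List.getElem?_replicate, if_pos hk]
    rfl
  · intro R hR ih hle
    obtain ⟨ihlen, ihget⟩ := ih (by omega)
    rw [PySem.List.pyRange_one_succ_right (by omega), List.foldl_append]
    simp only [List.foldl_cons, List.foldl_nil]
    set G := ((PySem.List.pyRange 0 R 1).foldl (fun new r =>
        ((PySem.List.pyRange r ((final.toNat : Int) + 1) s).foldl
          (fun (st : List Int × Int) m =>
            let acc := st.2 + poly.getD m.toNat 0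
            (st.1.set m.toNat acc, acc)) (new, 0)).1)
        (List.replicate (final.toNat + 1) 0)) with hG
    have hRs : R < s := by omega
    obtain ⟨slen, sget⟩ := pvSweepFull poly s hs R hR hRs ((final.toNat : Int) + 1)
      (by omega) G (by rw [ihlen]; push_cast; ring)
    refine ⟨by rw [slen, ihlen], fun k hk => ?_⟩
    rw [sget k (by omega), ihget k hk]
    have hres := pvResidue s R hR hRs k
    by_cases hc : R ≤ (k : Int) ∧ s ∣ ((k : Int) - R)
    · rw [if_pos hc]
      have hmod : (k : Int) % s = R := hres.mp hc
      rw [if_pos (by omega), ← pvPS_top poly s final.toNat k (by omega)]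
    · rw [if_neg hc]
      have hmodne : (k : Int) % s ≠ R := fun h => hc (hres.mpr h)
      by_cases hlt : (k : Int) % s < R
      · rw [if_pos hlt, if_pos (by omega)]
      · rw [if_neg hlt, if_neg (by omega)]

-- B's scatter step equals the rolling-update bridge step
lemma pvStepC_spec (final : Int) (poly : List Int) (s : Int)
    (hlen : poly.length = final.toNat + 1) :
    pvStepC final poly s = pvStepB final poly s := by
  by_cases hs : 0 < s
  · obtain ⟨clen, cget⟩ := pvOuterC final poly s hs (min s ((final.toNat : Int) + 1))
      (by omega) le_rfl
    rw [pvStepB_spec final poly s hlen (le_of_lt hs)]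
    unfold pvStepC
    rw [if_pos hs]
    apply List.ext_getElem
    · rw [clen]; simp
    · intro k hk1 hk2
      rw [clen] at hk1
      have hmod1 : (k : Int) % s < s := Int.emod_lt_of_pos _ hs
      have hmodle : (k : Int) % s ≤ (k : Int) := by
        by_cases hks : (k : Int) < s
        · rw [Int.emod_eq_of_lt (by positivity) hks]
        · omega
      have hmod0 : 0 ≤ (k : Int) % s := Int.emod_nonneg _ (by omega)
      have := cget k hk1
      rw [if_pos (by omega)] at this
      rw [List.getD_eq_getElem?_getD, List.getElem?_eq_getElem (by rw [clen]; exact hk1)] at this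
      simp only [Option.getD_some] at this
      rw [this, List.getElem_map, List.getElem_range]
      exact pvPS_eq_pvG poly s hs final.toNat k (by omega)
  · unfold pvStepC pvStepB
    rw [if_neg hs, if_neg hs]

lemma pvStepB_len' (final : Int) (dp : List Int) (s : Int)
    (hlen : dp.length = final.toNat + 1) :
    (pvStepB final dp s).length = final.toNat + 1 := by
  by_cases h : 0 < s
  · exact pvStepB_len final dp s hlen (le_of_lt h)
  · unfold pvStepB; rw [if_neg h]; exact hlen

lemma pvFoldCB (final : Int) :
    ∀ (l : List Int) (poly : List Int), poly.length = final.toNat + 1 →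
      l.foldl (pvStepC final) poly = l.foldl (pvStepB final) poly := by
  intro l
  induction l with
  | nil => intro poly _; rfl
  | cons s t ih =>
    intro poly hlen
    rw [List.foldl_cons, List.foldl_cons, pvStepC_spec final poly s hlen]
    exact ih _ (pvStepB_len' final poly s hlen)

-- port B, rewritten through pvStepC (the let n = len(poly)-1 evaluates to final.toNat)
lemma pvAltEq (final : Int) (l : List Int) :
    num_combinations_for_final_score_alt final l
    = (PySem.List.pyGet? (l.foldl (pvStepC final) (pvInit final)) (-1)).getD 0 := by
  unfold num_combinations_for_final_score_alt pvStepC pvInit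
  simp only [List.length_cons, List.length_replicate, Nat.add_sub_cancel]

theorem num_combinations_for_final_score_spec : Claim_equal_num_combinations_for_final_score := by
  intro final l _ hpre
  unfold Spec_num_combinations_for_final_score
  obtain ⟨hne, hcase⟩ := hpre
  have hlpos : 0 < l.length := List.length_pos_of_ne_nil hne
  rw [pvAltEq, pvFoldCB final l (pvInit final) (pvInit_len final)]
  show (PySem.List.pyGet? (pvArrA final l).toList (-1)).getD 0
    = (PySem.List.pyGet? (l.foldl (pvStepB final) (pvInit final)) (-1)).getD 0
  rw [pvArrA_toList]
  by_cases hF : 1 ≤ final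
  · have hpos : ∀ x ∈ l, 0 ≤ x := by
      rcases hcase with h | h
      · omega
      · exact h
    obtain ⟨hlen, hprops⟩ := pvOuterA final l hF hpos l.length le_rfl
    have hB : l.foldl (pvStepB final) (pvInit final) = pvRows final l (l.length - 1) := by
      have := pvFoldB_take final l (l.length - 1) (by omega)
      rw [show l.length - 1 + 1 = l.length by omega, List.take_length] at this
      exact this
    rw [pvFlatA_eq final l hF hpos l.length le_rfl, hB]
    -- the last flat cell is the last cell of the last row, which is pvRows (l.length - 1)
    have htne : pvTabA final l l.length ≠ [] := by
      intro h
      rw [h] at hlen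
      simp at hlen
      omega
    have hlastrow : pvTabA final l l.length
        = (pvTabA final l l.length).dropLast ++ [pvRows final l (l.length - 1)] := by
      conv_lhs => rw [← List.dropLast_append_getLast htne]
      congr 1
      have h1 := (hprops (l.length - 1) (by omega)).2 (by omega)
      rw [List.getD_eq_getElem?_getD,
        List.getElem?_eq_getElem (by rw [hlen]; omega)] at h1
      simp only [Option.getD_some] at h1
      rw [List.getLast_eq_getElem htne, ← h1]
      simp only [hlen]
    rw [hlastrow, List.flatten_append, List.flatten_cons, List.flatten_nil, List.append_nil]
    have hrne : pvRows final l (l.length - 1) ≠ [] := by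
      intro h
      have := pvRows_len final l hpos (l.length - 1)
      rw [h] at this
      simp at this
    rw [PySem.List.pyGet?_neg_one, PySem.List.pyGet?_neg_one, List.getLast?_append]
    cases hgl : (pvRows final l (l.length - 1)).getLast? with
    | none => exact absurd (List.getLast?_eq_none_iff.mp hgl) hrne
    | some v => rw [Option.some_or]
  · -- final_score ≤ 0: both programs leave the [1] rows untouched and return 1
    have hf0 : final.toNat = 0 := by omega
    have hA : pvFlatA final l l.length = List.replicate l.length 1 := by
      unfold pvFlatA
      rw [PySem.List.pyRange_one_eq_nil (by omega : final + 1 ≤ 1)]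
      simp only [List.foldl_nil, hf0, List.replicate_zero]
      rw [PySem.List.foldl_ignore]
      exact pvFlatOnes l
    have hB : l.foldl (pvStepB final) (pvInit final) = [1] := by
      have hInit : pvInit final = [1] := by
        unfold pvInit
        rw [hf0, List.replicate_zero]
      rw [hInit]
      rw [PySem.List.foldl_congr_mem l _ (fun dp _ => dp) ([1] : List Int)
        (by
          intro acc x _
          unfold pvStepB
          by_cases hx : 0 < x
          · rw [if_pos hx, PySem.List.pyRange_one_eq_nil (by omega)]
            rfl
          · rw [if_neg hx])]
      exact PySem.List.foldl_ignore _ _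
    rw [hA, hB]
    have hrep : (List.replicate l.length (1 : Int)).getLast? = some 1 := by
      rw [List.getLast?_eq_getElem?, List.length_replicate, List.getElem?_replicate,
        if_pos (by omega)]
    rw [PySem.List.pyGet?_neg_one, PySem.List.pyGet?_neg_one, hrep]
    rfl
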